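-- pv_equiv track=rewrite | github.com/TUSHAR91316/ET-gen-ai | src/engine.py | _translate_body_simulated
-- ===== SOURCE A (Python) =====
-- def _translate_body_simulated(body: str, lang: str) -> str:
--     # Replace some headings/phrasing to look "localized" for the demo.
--     # Keep it ASCII for portability.
--     replacements = {
--         "hi": {
--             "Summary": "Saransh",
--             "Required disclaimer": "Aavashyak disclaimer",
--             "Step": "Kadam",
--             "Regards,": "Shubhkamnayein,",
--         },
--         "ta": {
--             "Summary": "Surukkam",
--             "Required disclaimer": "Avashiya vilakkam",
--             "Step": "Padikkattu",
--             "Regards,": "Valthukkal,",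
--         },
--     }
--     rep = replacements.get(lang, {})
--     out = body
--     for k, v in rep.items():
--         out = out.replace(k, v)
--     return out
-- ===== SOURCE B (Python) =====
-- def _translate_body_simulated(body: str, lang: str) -> str:
--     # Single left-to-right pass: at each position try each localized phrase
--     # (in table order) and substitute on the first match, instead of one
--     # full-text str.replace pass per phrase.
--     tables = {
--         "hi": [
--             ("Summary", "Saransh"),
--             ("Required disclaimer", "Aavashyak disclaimer"),
--             ("Step", "Kadam"),
--             ("Regards,", "Shubhkamnayein,"),
--         ],
--         "ta": [
--             ("Summary", "Surukkam"),
--             ("Required disclaimer", "Avashiya vilakkam"),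
--             ("Step", "Padikkattu"),
--             ("Regards,", "Valthukkal,"),
--         ],
--     }
--     rep = tables.get(lang)
--     if not rep:
--         return body
--     out = []
--     i = 0
--     n = len(body)
--     while i < n:
--         for k, v in rep:
--             if body.startswith(k, i):
--                 out.append(v)
--                 i += len(k)
--                 break
--         else:
--             out.append(body[i])
--             i += 1
--     return "".join(out)
-- ===== Notes on version B (the rewrite author's own statement) =====
-- stated objective: alternative
-- what changed: A makes one full-text str.replace pass per localized phrase (building an intermediate string after each); B makes a single left-to-right pass over the body, substituting at each position the first phrase of the language's table that matches there.
import Mathlib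
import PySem

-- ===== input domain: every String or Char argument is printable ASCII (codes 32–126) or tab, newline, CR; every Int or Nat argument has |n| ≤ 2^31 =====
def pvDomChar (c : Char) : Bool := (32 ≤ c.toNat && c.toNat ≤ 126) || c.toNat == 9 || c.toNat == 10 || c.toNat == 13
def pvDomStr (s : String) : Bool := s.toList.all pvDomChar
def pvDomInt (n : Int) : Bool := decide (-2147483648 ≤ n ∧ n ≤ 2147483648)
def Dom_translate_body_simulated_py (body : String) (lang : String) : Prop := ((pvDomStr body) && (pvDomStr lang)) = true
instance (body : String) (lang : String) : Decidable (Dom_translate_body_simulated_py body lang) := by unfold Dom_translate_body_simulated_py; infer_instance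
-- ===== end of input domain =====

-- B replaces A's one full-text str.replace pass per phrase by a single left-to-right
-- scan that substitutes the first matching phrase at each position (objective: alternative).

-- ===== PORT A =====
-- literal port of A: nested dict of replacement tables, dict.get with default, then
-- a fold over rep.items() applying str.replace for each (k, v).
def translate_body_simulated_py (body : String) (lang : String) : String :=
  let replacements : PySem.Dict String (PySem.Dict String String) :=
    PySem.Dict.ofList
      [("hi", PySem.Dict.ofList
          [("Summary", "Saransh"), ("Required disclaimer", "Aavashyak disclaimer"),
           ("Step", "Kadam"), ("Regards,", "Shubhkamnayein,")]),
       ("ta", PySem.Dict.ofList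
          [("Summary", "Surukkam"), ("Required disclaimer", "Avashiya vilakkam"),
           ("Step", "Padikkattu"), ("Regards,", "Valthukkal,")])]
  let rep := replacements.getD lang PySem.Dict.empty
  rep.items.foldl (fun out kv => PySem.Str.replace out kv.1 kv.2) body

-- ===== PORT B =====
-- port of Source B's while-loop with inner for/else: the index i and body.startswith(k, i)
-- become structural recursion on the remaining suffix (exact: startswith at i on an
-- ASCII string is isPrefixOf on the suffix); out.append/join becomes list append.
def pvScan (ps : List (List Char × List Char)) : List Char → List Char
  | [] => []
  | c :: t =>
    match ps.find? (fun p => p.1.isPrefixOf (c :: t)) with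
    | some kv => kv.2 ++ pvScan ps (t.drop (kv.1.length - 1))
    | none => c :: pvScan ps t
termination_by s => s.length
decreasing_by
  · simp only [List.length_cons, List.length_drop]; omega
  · simp

def pvTable (lang : String) : List (String × String) :=
  if lang == "hi" then
    [("Summary", "Saransh"), ("Required disclaimer", "Aavashyak disclaimer"),
     ("Step", "Kadam"), ("Regards,", "Shubhkamnayein,")]
  else if lang == "ta" then
    [("Summary", "Surukkam"), ("Required disclaimer", "Avashiya vilakkam"),
     ("Step", "Padikkattu"), ("Regards,", "Valthukkal,")]
  else []

def translate_body_simulated_py_alt (body : String) (lang : String) : String :=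
  let rep := pvTable lang
  if rep.isEmpty then body
  else String.ofList (pvScan (rep.map fun p => (p.1.toList, p.2.toList)) body.toList)

-- ===== PRECONDITION & SPEC =====
def Spec_translate_body_simulated_py (body : String) (lang : String) (out : String) : Prop := out = translate_body_simulated_py_alt body lang
instance (body : String) (lang : String) (out : String) : Decidable (Spec_translate_body_simulated_py body lang out) := by unfold Spec_translate_body_simulated_py; infer_instance

-- ===== CLAIM (what is proved, stated in full; the proofs are below) =====
def Claim_equal_translate_body_simulated_py : Prop := ∀ (body : String) (lang : String), Dom_translate_body_simulated_py body lang → Spec_translate_body_simulated_py body lang (translate_body_simulated_py body lang)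

-- ===== LEMMAS AND PROOFS =====

-- proof-side model of Python's str.replace (PySem.Chars.replace) for a nonempty needle
def pvRepl (old new : List Char) : List Char → List Char
  | [] => []
  | c :: t =>
    if old.isPrefixOf (c :: t) then new ++ pvRepl old new (t.drop (old.length - 1))
    else c :: pvRepl old new t
termination_by s => s.length
decreasing_by
  · simp only [List.length_cons, List.length_drop]; omega
  · simp

theorem pvGo_eq (old new : List Char) (hne : old ≠ []) :
    ∀ (fuel : Nat) (l acc : List Char), l.length ≤ fuel →
      PySem.Chars.replace.go old new fuel l acc = acc.reverse ++ pvRepl old new l := by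
  intro fuel
  induction fuel with
  | zero =>
    intro l acc h
    have hl : l = [] := by cases l <;> simp_all
    subst hl
    rw [PySem.Chars.replace.go.eq_def]
    simp [pvRepl]
  | succ fuel ih =>
    intro l acc h
    match l with
    | [] => rw [PySem.Chars.replace.go.eq_def]; simp [pvRepl]
    | c :: t =>
      obtain ⟨o, os, rfl⟩ : ∃ o os, old = o :: os := by
        cases old with
        | nil => exact absurd rfl hne
        | cons o os => exact ⟨o, os, rfl⟩
      rw [PySem.Chars.replace.go.eq_def]
      by_cases hp : (o :: os).isPrefixOf (c :: t) = true
      · simp only [hp, if_pos]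
        have hdrop : List.drop (o :: os).length (c :: t) = List.drop os.length t := by
          simp [List.length_cons]
        rw [hdrop, ih _ _ (le_trans (List.length_drop ▸ Nat.sub_le _ _) (by simpa using h))]
        rw [pvRepl]
        simp [hp]
      · simp only [hp, if_neg, Bool.not_eq_true]
        rw [ih t (c :: acc) (by simpa using h)]
        rw [pvRepl]
        simp [hp]

theorem pvReplace_toList (s o n : String) (h : o.toList ≠ []) :
    (PySem.Str.replace s o n).toList = pvRepl o.toList n.toList s.toList := by
  rw [PySem.Str.toList_replace]
  unfold PySem.Chars.replace
  rw [if_neg (by simpa [List.isEmpty_iff] using h)]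
  simpa using pvGo_eq o.toList n.toList h s.toList.length s.toList [] le_rfl

-- pvOk u k = true: the needle k cannot match starting anywhere inside u, whatever follows u
def pvOk (u k : List Char) : Bool :=
  (List.range u.length).all fun p =>
    (List.range (min (u.length - p) k.length)).any fun j => !((u.drop p)[j]? == k[j]?)

theorem pvOk_spec {u k : List Char} (h : pvOk u k = true) :
    ∀ p, p < u.length → ∀ t, ¬ k <+: (u.drop p ++ t) := by
  intro p hp t hpre
  have hall := (List.all_eq_true.mp h) p (List.mem_range.mpr hp)
  obtain ⟨j, hjmem, hne⟩ := List.any_eq_true.mp hall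
  rw [List.mem_range] at hjmem
  have hjk : j < k.length := lt_of_lt_of_le hjmem (min_le_right _ _)
  have hju : j < (u.drop p).length := by
    rw [List.length_drop]; exact lt_of_lt_of_le hjmem (min_le_left _ _)
  have h1 : (u.drop p ++ t)[j]'(by rw [List.length_append]; omega) = (u.drop p)[j] :=
    List.getElem_append_left hju
  have h2 : k[j] = (u.drop p ++ t)[j]'(by rw [List.length_append]; omega) :=
    hpre.getElem hjk
  have : (u.drop p)[j]? = k[j]? := by
    rw [List.getElem?_eq_getElem hju, List.getElem?_eq_getElem hjk, ← h1, h2]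
  simp [this] at hne

theorem pvScan_nil_keys : ∀ u, pvScan [] u = u := by
  intro u
  induction u with
  | nil => rw [pvScan]
  | cons c t ih => rw [pvScan]; simp [ih]

theorem pvRepl_append (k v : List Char) :
    ∀ (u s : List Char), (∀ p, p < u.length → ∀ t, ¬ k <+: (u.drop p ++ t)) →
      pvRepl k v (u ++ s) = u ++ pvRepl k v s := by
  intro u
  induction u with
  | nil => simp
  | cons c rest ih =>
    intro s hsafe
    have h0 : ¬ k.isPrefixOf (c :: (rest ++ s)) = true := by
      rw [List.isPrefixOf_iff_prefix]
      exact fun hp => hsafe 0 (by simp) s (by simpa using hp)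
    show pvRepl k v (c :: (rest ++ s)) = _
    rw [pvRepl, if_neg h0, ih s (fun p hp t ht => hsafe (p + 1) (by simp; omega) t (by simpa using ht))]
    rfl

theorem pvScan_append (ps : List (List Char × List Char)) :
    ∀ (u s : List Char), (∀ p, p < u.length → ∀ t, ∀ pr ∈ ps, ¬ pr.1 <+: (u.drop p ++ t)) →
      pvScan ps (u ++ s) = u ++ pvScan ps s := by
  intro u
  induction u with
  | nil => simp
  | cons c rest ih =>
    intro s hsafe
    have h0 : ps.find? (fun p => p.1.isPrefixOf (c :: (rest ++ s))) = none := by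
      rw [List.find?_eq_none]
      intro pr hpr hp
      exact hsafe 0 (by simp) s pr hpr (by simpa using List.isPrefixOf_iff_prefix.mp hp)
    show pvScan ps (c :: (rest ++ s)) = _
    rw [pvScan]
    simp only [h0]
    rw [ih s (fun p hp t pr hpr ht => hsafe (p + 1) (by simp; omega) t pr hpr (by simpa using ht))]
    rfl

theorem pvTailPrefix (ps : List (List Char × List Char)) (k : List Char)
    (h3 : ∀ pr ∈ ps, pr.2 ≠ [] ∧ ∀ m, m < k.length → 1 ≤ m → (k.drop m).head? ≠ pr.2.head?) :
    ∀ (n : Nat) (t : List Char), t.length ≤ n → ∀ m, 1 ≤ m → m < k.length →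
      (k.drop m) <+: pvScan ps t → (k.drop m) <+: t := by
  intro n
  induction n with
  | zero =>
    intro t ht m h1 h2 hp
    have : t = [] := by cases t <;> simp_all
    subst this
    rw [pvScan] at hp
    have := List.prefix_nil.mp hp
    have : k.length ≤ m := by
      have := congrArg List.length this; simp [List.length_drop] at this; omega
    omega
  | succ n ih =>
    intro t ht m h1 h2 hp
    cases t with
    | nil =>
      rw [pvScan] at hp
      have := List.prefix_nil.mp hp
      have : k.length ≤ m := by
        have := congrArg List.length this; simp [List.length_drop] at this; omega
      omega
    | cons c t' =>
      rw [pvScan] at hp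
      cases hfind : List.find? (fun p => p.1.isPrefixOf (c :: t')) ps with
      | some kv =>
        rw [hfind] at hp
        dsimp only at hp
        obtain ⟨hv, hh⟩ := h3 kv (List.mem_of_find?_eq_some hfind)
        exfalso
        obtain ⟨a, w, hw⟩ := List.exists_cons_of_ne_nil
          (show k.drop m ≠ [] by
            intro hnil
            have := congrArg List.length hnil; simp [List.length_drop] at this; omega)
        obtain ⟨b, w2, hw2⟩ := List.exists_cons_of_ne_nil hv
        rw [hw, hw2, List.cons_append, List.cons_prefix_cons] at hp
        exact hh m h2 h1 (by rw [hw, hw2]; simpa using hp.1)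
      | none =>
        rw [hfind] at hp
        dsimp only at hp
        rw [List.drop_eq_getElem_cons h2, List.cons_prefix_cons] at hp
        obtain ⟨hc, htl⟩ := hp
        have htail : k.drop (m + 1) <+: t' := by
          by_cases hm : m + 1 < k.length
          · exact ih t' (by simp at ht; omega) (m + 1) (by omega) hm htl
          · rw [List.drop_eq_nil_of_le (by omega)]; exact List.nil_prefix
        rw [List.drop_eq_getElem_cons h2, hc]
        exact (List.cons_prefix_cons).mpr ⟨rfl, htail⟩

theorem pvStep (ps : List (List Char × List Char)) (k v : List Char) (hk : k ≠ [])
    (h1 : ∀ pr ∈ ps, ∀ p, p < pr.2.length → ∀ t, ¬ k <+: (pr.2.drop p ++ t))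
    (h2 : ∀ pr ∈ ps, ∀ p, p < k.length → ∀ t, ¬ pr.1 <+: (k.drop p ++ t))
    (h3 : ∀ pr ∈ ps, pr.2 ≠ [] ∧ ∀ m, m < k.length → 1 ≤ m → (k.drop m).head? ≠ pr.2.head?) :
    ∀ (n : Nat) (u : List Char), u.length ≤ n →
      pvRepl k v (pvScan ps u) = pvScan (ps ++ [(k, v)]) u := by
  intro n
  induction n with
  | zero =>
    intro u hu
    have : u = [] := by cases u <;> simp_all
    subst this
    rw [pvScan, pvScan, pvRepl]
  | succ n ih =>
    intro u hu
    cases u with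
    | nil => rw [pvScan, pvScan, pvRepl]
    | cons c t =>
      rw [pvScan, pvScan, List.find?_append]
      cases hfind : List.find? (fun p => p.1.isPrefixOf (c :: t)) ps with
      | some kv =>
        rw [Option.some_or]
        dsimp only
        rw [pvRepl_append k v kv.2 _ (h1 kv (List.mem_of_find?_eq_some hfind))]
        rw [ih _ (le_trans (List.length_drop ▸ Nat.sub_le _ _) (by simpa using hu))]
      | none =>
        rw [Option.none_or]
        by_cases hkp : k <+: (c :: t)
        · obtain ⟨rest, hrest⟩ := hkp
          obtain ⟨c0, k', rfl⟩ : ∃ c0 k', k = c0 :: k' := by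
            cases k with
            | nil => exact absurd rfl hk
            | cons c0 k' => exact ⟨c0, k', rfl⟩
          have hinj := hrest
          rw [List.cons_append] at hinj
          injection hinj with hc htl
          subst hc
          have hdrop : t.drop ((c0 :: k').length - 1) = rest := by
            rw [← htl]; simp
          have hscan : pvScan ps (c0 :: t) = (c0 :: k') ++ pvScan ps rest := by
            have hct : (c0 :: t) = (c0 :: k') ++ rest := by rw [← htl]; rfl
            rw [hct]
            exact pvScan_append ps (c0 :: k') rest
              (fun p hp t' pr hpr => h2 pr hpr p hp t')
          dsimp only
          have hstep : c0 :: pvScan ps t = (c0 :: k') ++ pvScan ps rest := by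
            have h' : pvScan ps (c0 :: t) = c0 :: pvScan ps t := by
              rw [pvScan, hfind]
            rw [← h', hscan]
          rw [hstep, List.cons_append, pvRepl,
            if_pos (List.isPrefixOf_iff_prefix.mpr ⟨pvScan ps rest, by simp⟩)]
          have hpref : ((c0 :: k').isPrefixOf (c0 :: t)) = true := by
            rw [List.isPrefixOf_iff_prefix]; exact ⟨rest, hrest⟩
          rw [List.find?, hpref]
          dsimp only
          rw [hdrop]
          have hd2 : (k' ++ pvScan ps rest).drop ((c0 :: k').length - 1) = pvScan ps rest := by
            simp
          rw [hd2]
          congr 1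
          exact ih rest (by
            have h5 := congrArg List.length htl
            simp only [List.length_append, List.length_cons] at h5 hu ⊢
            omega)
        · have hnp : ¬ (k.isPrefixOf (c :: pvScan ps t)) = true := by
            rw [List.isPrefixOf_iff_prefix]
            intro hpre
            obtain ⟨c0, k', rfl⟩ : ∃ c0 k', k = c0 :: k' := by
              cases k with
              | nil => exact absurd rfl hk
              | cons c0 k' => exact ⟨c0, k', rfl⟩
            rw [List.cons_prefix_cons] at hpre
            obtain ⟨rfl, hk'⟩ := hpre
            cases hk'e : k' with
            | nil =>
              subst hk'e
              exact hkp ((List.cons_prefix_cons).mpr ⟨rfl, List.nil_prefix⟩)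
            | cons a b =>
              have hlen : 1 < (c0 :: k').length := by subst hk'e; simp
              have htp : (c0 :: k').drop 1 <+: t :=
                pvTailPrefix ps (c0 :: k') h3 t.length t le_rfl 1 le_rfl hlen (by simpa using hk')
              exact hkp ((List.cons_prefix_cons).mpr ⟨rfl, by simpa using htp⟩)
          rw [pvRepl, if_neg hnp]
          have hfind2 : (k.isPrefixOf (c :: t)) = false := by
            rw [← Bool.not_eq_true, List.isPrefixOf_iff_prefix]; exact hkp
          rw [List.find?, hfind2]
          dsimp only
          rw [List.find?]
          rw [ih t (by simpa using hu)]

-- packaged step with decidable side conditions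
theorem pvStepB (ps : List (List Char × List Char)) (k v : List Char) (hk : k ≠ [])
    (h1 : ps.all (fun pr => pvOk pr.2 k) = true)
    (h2 : ps.all (fun pr => pvOk k pr.1) = true)
    (h3 : ∀ pr ∈ ps, pr.2 ≠ [] ∧ ∀ m, m < k.length → 1 ≤ m → (k.drop m).head? ≠ pr.2.head?) :
    ∀ u, pvRepl k v (pvScan ps u) = pvScan (ps ++ [(k, v)]) u := by
  intro u
  exact pvStep ps k v hk
    (fun pr hpr => pvOk_spec (List.all_eq_true.mp h1 pr hpr))
    (fun pr hpr => pvOk_spec (List.all_eq_true.mp h2 pr hpr))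
    h3 u.length u le_rfl

-- the four (key, value) pairs per language, as char lists
def pvHi : List (List Char × List Char) :=
  [("Summary".toList, "Saransh".toList),
   ("Required disclaimer".toList, "Aavashyak disclaimer".toList),
   ("Step".toList, "Kadam".toList),
   ("Regards,".toList, "Shubhkamnayein,".toList)]

def pvTa : List (List Char × List Char) :=
  [("Summary".toList, "Surukkam".toList),
   ("Required disclaimer".toList, "Avashiya vilakkam".toList),
   ("Step".toList, "Padikkattu".toList),
   ("Regards,".toList, "Valthukkal,".toList)]

theorem pvChain (ps : List (List Char × List Char))
    (h : ∀ i, i < ps.length →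
      (ps[i]!.1 ≠ [] ∧
       (ps.take i).all (fun pr => pvOk pr.2 ps[i]!.1) = true ∧
       (ps.take i).all (fun pr => pvOk ps[i]!.1 pr.1) = true ∧
       ∀ pr ∈ ps.take i, pr.2 ≠ [] ∧
         ∀ m, m < ps[i]!.1.length → 1 ≤ m → (ps[i]!.1.drop m).head? ≠ pr.2.head?)) :
    ∀ s, ps.foldl (fun out kv => pvRepl kv.1 kv.2 out) s = pvScan ps s := by
  -- generic chaining: fold of pvRepl over ps equals pvScan ps
  suffices h' : ∀ (qs rs : List (List Char × List Char)), ps = qs ++ rs →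
      ∀ s, rs.foldl (fun out kv => pvRepl kv.1 kv.2 out) (pvScan qs s) = pvScan ps s by
    intro s
    have := h' [] ps rfl s
    rwa [pvScan_nil_keys] at this
  intro qs rs
  induction rs generalizing qs with
  | nil => intro hps s; simp [hps]
  | cons kv rs ih =>
    obtain ⟨kk, vv⟩ := kv
    intro hps s
    have hi : qs.length < ps.length := by rw [hps]; simp
    have hget : ps[qs.length]! = (kk, vv) := by
      rw [hps]
      rw [getElem!_pos _ _ (by simp)]
      simp
    obtain ⟨hk, h1, h2, h3⟩ := h qs.length hi
    rw [hget] at hk h1 h2 h3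
    have htake : ps.take qs.length = qs := by rw [hps]; simp
    rw [htake] at h1 h2 h3
    simp only [List.foldl_cons]
    rw [pvStepB qs kk vv hk h1 h2 h3]
    exact ih (qs ++ [(kk, vv)]) (by simp [hps]) s

-- closed-form reductions of the two ports at each language
theorem pvA_hi (body : String) : translate_body_simulated_py body "hi"
    = PySem.Str.replace (PySem.Str.replace (PySem.Str.replace (PySem.Str.replace
        body "Summary" "Saransh") "Required disclaimer" "Aavashyak disclaimer")
        "Step" "Kadam") "Regards," "Shubhkamnayein," := rfl

theorem pvA_ta (body : String) : translate_body_simulated_py body "ta"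
    = PySem.Str.replace (PySem.Str.replace (PySem.Str.replace (PySem.Str.replace
        body "Summary" "Surukkam") "Required disclaimer" "Avashiya vilakkam")
        "Step" "Padikkattu") "Regards," "Valthukkal," := rfl

theorem pvB_hi (body : String) : translate_body_simulated_py_alt body "hi"
    = String.ofList (pvScan pvHi body.toList) := rfl

theorem pvB_ta (body : String) : translate_body_simulated_py_alt body "ta"
    = String.ofList (pvScan pvTa body.toList) := rfl

theorem pvA_other (body : String) (lang : String) (h1 : lang ≠ "hi") (h2 : lang ≠ "ta") :
    translate_body_simulated_py body lang = body := by
  unfold translate_body_simulated_py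
  have e1 : (("hi" : String) == lang) = false := by
    simp [beq_eq_false_iff_ne]; exact fun h => h1 h.symm
  have e2 : (("ta" : String) == lang) = false := by
    simp [beq_eq_false_iff_ne]; exact fun h => h2 h.symm
  simp only [PySem.Dict.getD, PySem.Dict.get?]
  rw [show (PySem.Dict.ofList
      [("hi", PySem.Dict.ofList
          [("Summary", "Saransh"), ("Required disclaimer", "Aavashyak disclaimer"),
           ("Step", "Kadam"), ("Regards,", "Shubhkamnayein,")]),
       ("ta", PySem.Dict.ofList
          [("Summary", "Surukkam"), ("Required disclaimer", "Avashiya vilakkam"),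
           ("Step", "Padikkattu"), ("Regards,", "Valthukkal,")])]).items
    = [("hi", PySem.Dict.ofList
          [("Summary", "Saransh"), ("Required disclaimer", "Aavashyak disclaimer"),
           ("Step", "Kadam"), ("Regards,", "Shubhkamnayein,")]),
       ("ta", PySem.Dict.ofList
          [("Summary", "Surukkam"), ("Required disclaimer", "Avashiya vilakkam"),
           ("Step", "Padikkattu"), ("Regards,", "Valthukkal,")])] from rfl]
  rw [List.find?, e1]
  rw [List.find?, e2]
  rfl

theorem pvB_other (body : String) (lang : String) (h1 : lang ≠ "hi") (h2 : lang ≠ "ta") :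
    translate_body_simulated_py_alt body lang = body := by
  unfold translate_body_simulated_py_alt pvTable
  have e1 : (lang == "hi") = false := by simpa [beq_eq_false_iff_ne] using h1
  have e2 : (lang == "ta") = false := by simpa [beq_eq_false_iff_ne] using h2
  rw [e1, e2]
  rfl

-- the side conditions of pvChain for the two literal tables
theorem pvHi_cond : ∀ i, i < pvHi.length →
    (pvHi[i]!.1 ≠ [] ∧
     (pvHi.take i).all (fun pr => pvOk pr.2 pvHi[i]!.1) = true ∧
     (pvHi.take i).all (fun pr => pvOk pvHi[i]!.1 pr.1) = true ∧
     ∀ pr ∈ pvHi.take i, pr.2 ≠ [] ∧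
       ∀ m, m < pvHi[i]!.1.length → 1 ≤ m → (pvHi[i]!.1.drop m).head? ≠ pr.2.head?) := by
  decide

theorem pvTa_cond : ∀ i, i < pvTa.length →
    (pvTa[i]!.1 ≠ [] ∧
     (pvTa.take i).all (fun pr => pvOk pr.2 pvTa[i]!.1) = true ∧
     (pvTa.take i).all (fun pr => pvOk pvTa[i]!.1 pr.1) = true ∧
     ∀ pr ∈ pvTa.take i, pr.2 ≠ [] ∧
       ∀ m, m < pvTa[i]!.1.length → 1 ≤ m → (pvTa[i]!.1.drop m).head? ≠ pr.2.head?) := by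
  decide

-- ===== VERDICT (by name: the statement is the Claim_ definition above) =====
theorem translate_body_simulated_py_spec : Claim_equal_translate_body_simulated_py := by
  unfold Claim_equal_translate_body_simulated_py Spec_translate_body_simulated_py
  intro body lang _
  by_cases h1 : lang = "hi"
  · subst h1
    rw [pvA_hi, pvB_hi]
    refine (String.ofList_toList (s := _)).symm.trans (congrArg String.ofList ?_)
    rw [pvReplace_toList _ _ _ (by decide), pvReplace_toList _ _ _ (by decide),
        pvReplace_toList _ _ _ (by decide), pvReplace_toList _ _ _ (by decide)]
    have := pvChain pvHi pvHi_cond body.toList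
    simpa [pvHi, List.foldl] using this
  · by_cases h2 : lang = "ta"
    · subst h2
      rw [pvA_ta, pvB_ta]
      refine (String.ofList_toList (s := _)).symm.trans (congrArg String.ofList ?_)
      rw [pvReplace_toList _ _ _ (by decide), pvReplace_toList _ _ _ (by decide),
          pvReplace_toList _ _ _ (by decide), pvReplace_toList _ _ _ (by decide)]
      have := pvChain pvTa pvTa_cond body.toList
      simpa [pvTa, List.foldl] using this
    · rw [pvA_other body lang h1 h2, pvB_other body lang h1 h2]
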